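-- pv_equiv track=rewrite | github.com/AdrianGabryla/pp1 | 09-Test2/mock2/p2.py | f
-- ===== SOURCE A (Python) =====
-- def f(n):
--     counter = 0
--     for i in n:
--         if i == "+":
--             counter += 1
--         else:
--             counter -= 1
--     return counter
-- ===== SOURCE B (Python) =====
-- def f(n):
--     return 2 * n.count("+") - len(n)
-- ===== Notes on version B (the rewrite author's own statement) =====
-- stated objective: faster
-- what changed: Replaced the per-character conditional accumulator loop with the closed form 2*n.count('+') - len(n), using C-level aggregate calls instead of a Python-level loop.
import Mathlib
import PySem

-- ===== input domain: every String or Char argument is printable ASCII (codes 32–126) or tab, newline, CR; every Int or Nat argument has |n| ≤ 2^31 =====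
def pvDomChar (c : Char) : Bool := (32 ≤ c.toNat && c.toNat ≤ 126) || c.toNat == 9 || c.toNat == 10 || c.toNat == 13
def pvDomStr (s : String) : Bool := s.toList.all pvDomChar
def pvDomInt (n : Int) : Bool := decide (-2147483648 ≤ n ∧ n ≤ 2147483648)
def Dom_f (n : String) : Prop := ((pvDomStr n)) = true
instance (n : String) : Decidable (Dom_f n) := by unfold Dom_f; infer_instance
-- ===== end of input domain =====

-- B replaces A's per-character conditional accumulator with the closed form
-- 2*n.count('+') - len(n) (idiomatic aggregate calls; return value only).

-- ===== PORT A =====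
-- for i in n: counter += 1 if i == "+" else counter -= 1
def f (n : String) : Int :=
  n.toList.foldl (fun counter i => if i == '+' then counter + 1 else counter - 1) 0

-- ===== PORT B =====
def f_alt (n : String) : Int :=
  2 * (PySem.Str.count n "+" : Int) - (PySem.Str.len n : Int)

-- ===== PRECONDITION & SPEC =====
def Spec_f (n : String) (out : Int) : Prop := out = f_alt n
instance (n : String) (out : Int) : Decidable (Spec_f n out) := by unfold Spec_f; infer_instance

-- ===== CLAIM (what is proved, stated in full; the proofs are below) =====
def Claim_equal_f : Prop := ∀ (n : String), Dom_f n → Spec_f n (f n)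

-- ===== LEMMAS AND PROOFS =====

theorem count_go_single (c : Char) (s : List Char) :
    ∀ (fuel acc : Nat), s.length ≤ fuel →
      PySem.Chars.count.go [c] fuel s acc = acc + s.count c := by
  induction s with
  | nil => intro fuel acc _; cases fuel <;> simp [PySem.Chars.count.go]
  | cons h t ih =>
    intro fuel acc hf
    cases fuel with
    | zero => simp at hf
    | succ m =>
      have hm : t.length ≤ m := by simpa using hf
      by_cases hc : h = c
      · subst hc
        simp [PySem.Chars.count.go, List.isPrefixOf, ih m (acc + 1) hm]
        omega
      · have : ([c].isPrefixOf (h :: t)) = false := by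
          simp [List.isPrefixOf]; exact fun e => hc e.symm
        simp [PySem.Chars.count.go, this, ih m acc hm, hc]

theorem count_single (c : Char) (s : List Char) :
    PySem.Chars.count s [c] = s.count c := by
  simp [PySem.Chars.count, count_go_single c s s.length 0 le_rfl]

theorem foldl_pm (l : List Char) : ∀ (a : Int),
    l.foldl (fun counter i => if i == '+' then counter + 1 else counter - 1) a
      = a + 2 * (l.count '+' : Int) - (l.length : Int) := by
  induction l with
  | nil => intro a; simp
  | cons h t ih =>
    intro a
    rw [List.foldl_cons, ih, List.count_cons, List.length_cons]
    by_cases hc : h = '+' <;> simp [hc] <;> push_cast <;> ring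

-- ===== VERDICT (by name: the statement is the Claim_ definition above) =====
theorem f_spec : Claim_equal_f := by
  intro n _
  unfold Spec_f f f_alt
  have : PySem.Str.count n "+" = n.toList.count '+' := by
    simpa using count_single '+' n.toList
  rw [foldl_pm, this, PySem.Str.len_eq]
  ring
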